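-- pv_equiv track=rewrite | github.com/BryanEspana/Ejs_criptografia | parte2/base64_a_ascii.py | indices_a_binario
-- ===== SOURCE A (Python) =====
-- def indices_a_binario(texto_en_indices):
--     bits_concatenados = ""
--
--     for caracter in texto_en_indices.split():
--         numero = int(caracter)
--         binario = ""
--
--         if numero == 0:
--             binario = "0"
--
--         while numero > 0:
--             resultado_modulo = numero % 2
--             binario = str(resultado_modulo) + binario
--             numero = numero // 2
--
--         while len(binario) < 6:
--             binario = "0" + binario
--
--         bits_concatenados += binario
--
--     resultado = ""
--     for i in range(0, (len(bits_concatenados) // 8) * 8, 8):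
--         byte = bits_concatenados[i:i+8]
--         resultado += byte + " "
--
--     return resultado.strip()
-- ===== SOURCE B (Python) =====
-- def indices_a_binario(texto_en_indices):
--     # single streaming pass: feed each token's bits into a short pending buffer,
--     # emit a byte whenever 8 bits are available; never materializes the full bit string
--     bytes_emitidos = []
--     pendiente = ""
--     for caracter in texto_en_indices.split():
--         numero = int(caracter)
--         crudo = format(numero, "b") if numero > 0 else ""
--         pendiente += "0" * (6 - len(crudo)) + crudo
--         while len(pendiente) >= 8:
--             bytes_emitidos.append(pendiente[:8])
--             pendiente = pendiente[8:]
--     return " ".join(bytes_emitidos)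
-- ===== Notes on version B (the rewrite author's own statement) =====
-- stated objective: alternative
-- what changed: A builds the entire concatenated bit string, then slices it into 8-bit chunks in a second indexed loop and strips a trailing space; B is a single streaming pass that keeps a short pending-bits buffer, emits each full byte as soon as 8 bits are available, and space-joins the emitted bytes, never materializing the full bit string.
import Mathlib
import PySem

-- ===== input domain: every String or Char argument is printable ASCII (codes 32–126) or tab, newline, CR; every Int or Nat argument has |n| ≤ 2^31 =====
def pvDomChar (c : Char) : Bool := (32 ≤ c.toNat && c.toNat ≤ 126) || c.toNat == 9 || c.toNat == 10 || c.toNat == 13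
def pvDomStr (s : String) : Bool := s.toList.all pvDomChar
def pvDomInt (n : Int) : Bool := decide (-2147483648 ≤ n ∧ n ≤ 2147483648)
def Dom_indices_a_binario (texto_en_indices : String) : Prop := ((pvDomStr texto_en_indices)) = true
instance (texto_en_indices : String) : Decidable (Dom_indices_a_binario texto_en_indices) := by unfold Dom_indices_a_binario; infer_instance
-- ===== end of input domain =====

-- B replaces A's build-whole-bitstring-then-slice two passes by one streaming pass with a short
-- pending-bits buffer that emits each byte as soon as 8 bits are available (alternative decomposition, same cost).


-- ===== PORT A =====
-- 'while numero > 0: binario = str(numero % 2) + binario; numero = numero // 2'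
def pvToBinA (numero : Int) (binario : List Char) : List Char :=
  if numero > 0 then
    pvToBinA (PySem.Int.floordiv numero 2) (PySem.Int.toChars (PySem.Int.mod numero 2) ++ binario)
  else binario
termination_by numero.toNat
decreasing_by
  rename_i h
  rw [PySem.Int.floordiv_eq_ediv_of_pos (by omega : (0:Int) < 2)]
  omega

-- 'while len(binario) < 6: binario = "0" + binario'
def pvPadA (binario : List Char) : List Char :=
  if binario.length < 6 then pvPadA ('0' :: binario) else binario
termination_by 6 - binario.length
decreasing_by simp_all; omega

def indices_a_binario (texto_en_indices : String) : String :=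
  let bits_concatenados :=
    (PySem.Str.split₀ texto_en_indices).foldl (fun acc caracter =>
      -- 'numero = int(caracter)'; none = ValueError, excluded by Pre_
      let numero := (PySem.Int.ofStr? caracter).getD 0
      acc ++ pvPadA (pvToBinA numero (if numero = 0 then ['0'] else []))) ([] : List Char)
  let resultado :=
    (PySem.List.pyRange 0 (PySem.Int.floordiv (bits_concatenados.length : Int) 8 * 8) 8).foldl
      (fun res i => res ++ PySem.Chars.slice bits_concatenados (some i) (some (i + 8)) ++ [' '])
      ([] : List Char)
  String.ofList (PySem.Chars.strip resultado)

-- ===== PORT B =====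
-- 'format(numero, "b")' for numero > 0 (binary digits, most significant first)
def pvFmtB (n : Nat) : List Char :=
  if n = 0 then [] else pvFmtB (n / 2) ++ [if n % 2 = 1 then '1' else '0']
termination_by n
decreasing_by omega

-- 'crudo = format(numero,"b") if numero > 0 else ""; "0" * (6 - len(crudo)) + crudo'
def pvTokenBitsB (numero : Int) : List Char :=
  let crudo := if numero > 0 then pvFmtB numero.toNat else []
  List.replicate (6 - crudo.length) '0' ++ crudo

-- 'while len(pendiente) >= 8: bytes_emitidos.append(pendiente[:8]); pendiente = pendiente[8:]'
def pvEmitB (out : List (List Char)) (pendiente : List Char) : List (List Char) × List Char :=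
  if 8 ≤ pendiente.length then
    pvEmitB (out ++ [PySem.Chars.slice pendiente none (some 8)])
            (PySem.Chars.slice pendiente (some 8) none)
  else (out, pendiente)
termination_by pendiente.length
decreasing_by
  rename_i h
  rw [PySem.Chars.slice_eq_listSlice, PySem.List.slice_from pendiente (a := 8) (by omega)]
  simp
  omega

def indices_a_binario_alt (texto_en_indices : String) : String :=
  let fin :=
    (PySem.Str.split₀ texto_en_indices).foldl (fun st caracter =>
      -- 'numero = int(caracter)'; none = ValueError, excluded by Pre_
      let numero := (PySem.Int.ofStr? caracter).getD 0
      pvEmitB st.1 (st.2 ++ pvTokenBitsB numero))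
      (([], []) : List (List Char) × List Char)
  String.ofList (PySem.Chars.join [' '] fin.1)

-- ===== PRECONDITION & SPEC =====
-- Pre_ excludes exactly the inputs with a whitespace-separated token that is not a valid integer; both programs raise ValueError there.
def Pre_indices_a_binario (texto_en_indices : String) : Prop :=
  ∀ caracter ∈ PySem.Str.split₀ texto_en_indices, (PySem.Int.ofStr? caracter).isSome = true
instance (texto_en_indices : String) : Decidable (Pre_indices_a_binario texto_en_indices) := by
  unfold Pre_indices_a_binario; infer_instance

def pvWitness_indices_a_binario : String := "3 17 64 0 -2"

def Spec_indices_a_binario (texto_en_indices : String) (out : String) : Prop := out = indices_a_binario_alt texto_en_indices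
instance (texto_en_indices : String) (out : String) : Decidable (Spec_indices_a_binario texto_en_indices out) := by unfold Spec_indices_a_binario; infer_instance

-- ===== CLAIM (what is proved, stated in full; the proofs are below) =====
def Claim_equal_indices_a_binario : Prop := ∀ (texto_en_indices : String), Dom_indices_a_binario texto_en_indices → Pre_indices_a_binario texto_en_indices → Spec_indices_a_binario texto_en_indices (indices_a_binario texto_en_indices)

-- ===== LEMMAS AND PROOFS =====

-- full 8-char chunks of a char list, and the (<8) remainder
def pvChunks (l : List Char) : List (List Char) :=
  if 8 ≤ l.length then l.take 8 :: pvChunks (l.drop 8) else []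
termination_by l.length
decreasing_by simp; omega

def pvRem (l : List Char) : List Char :=
  if 8 ≤ l.length then pvRem (l.drop 8) else l
termination_by l.length
decreasing_by simp; omega

theorem pvToBinA_eq (k : Nat) (acc : List Char) :
    pvToBinA (k : Int) acc = pvFmtB k ++ acc := by
  induction k using Nat.strong_induction_on generalizing acc with
  | _ k ih =>
    rw [pvToBinA, pvFmtB]
    by_cases hk : k = 0
    · subst hk; simp
    · have h2 : ((k : Int) > 0) := by omega
      rw [if_pos h2, if_neg hk]
      have e2 : ((2 : Int)) = ((2 : Nat) : Int) := by norm_num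
      rw [e2, PySem.Int.floordiv_natCast, PySem.Int.mod_natCast]
      rw [ih (k / 2) (by omega)]
      have ht : PySem.Int.toChars ((k % 2 : Nat) : Int) = [if k % 2 = 1 then '1' else '0'] := by
        rcases Nat.mod_two_eq_zero_or_one k with h | h <;> rw [h] <;> decide
      rw [ht, List.append_assoc]

theorem pvPadA_eq (b : List Char) :
    pvPadA b = List.replicate (6 - b.length) '0' ++ b := by
  fun_induction pvPadA b with
  | case1 b h ih =>
    rw [ih]
    have e : 6 - b.length = (6 - ('0' :: b).length) + 1 := by simp at h ⊢; omega
    rw [e, List.replicate_succ']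
    simp
  | case2 b h =>
    have e : 6 - b.length = 0 := by simp at h; omega
    rw [e]; simp

theorem tokenBits_eq (n : Int) :
    pvPadA (pvToBinA n (if n = 0 then ['0'] else [])) = pvTokenBitsB n := by
  rcases lt_trichotomy n 0 with h | h | h
  · have h1 : ¬ n = 0 := by omega
    have h2 : ¬ n > 0 := by omega
    rw [if_neg h1, pvToBinA, if_neg h2, pvPadA_eq]
    simp [pvTokenBitsB, if_neg h2]
  · subst h
    rw [pvToBinA, if_neg (by omega : ¬ (0:Int) > 0), pvPadA_eq]
    have e : pvTokenBitsB 0 = List.replicate 6 '0' := by simp [pvTokenBitsB]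
    rw [if_pos rfl, e, show (6:Nat) = 5 + 1 from rfl, List.replicate_succ']
    simp
  · have h1 : ¬ n = 0 := by omega
    have e : ((n.toNat : Nat) : Int) = n := Int.toNat_of_nonneg (le_of_lt h)
    rw [if_neg h1, ← e, pvToBinA_eq, pvPadA_eq]
    simp [pvTokenBitsB, e, if_pos h]

theorem pvChunks_append (a b : List Char) :
    pvChunks (a ++ b) = pvChunks a ++ pvChunks (pvRem a ++ b) := by
  fun_induction pvChunks a with
  | case1 l h ih =>
    have hlb : 8 ≤ (l ++ b).length := by simp; omega
    rw [pvChunks, if_pos hlb, pvRem, if_pos h]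
    rw [List.take_append_of_le_length (by omega), List.drop_append_of_le_length (by omega)]
    rw [ih]
    simp
  | case2 l h =>
    rw [pvRem, if_neg h]
    simp

theorem pvRem_append (a b : List Char) :
    pvRem (a ++ b) = pvRem (pvRem a ++ b) := by
  fun_induction pvRem a with
  | case1 l h ih =>
    have hlb : 8 ≤ (l ++ b).length := by simp; omega
    rw [pvRem, if_pos hlb, List.drop_append_of_le_length (by omega), ih]
  | case2 l h => rfl

theorem pvEmitB_eq (p : List Char) (out : List (List Char)) :
    pvEmitB out p = (out ++ pvChunks p, pvRem p) := by
  fun_induction pvEmitB out p with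
  | case1 out p h ih =>
    rw [ih]
    conv_rhs => rw [pvChunks, if_pos h, pvRem, if_pos h]
    simp only [PySem.Chars.slice_eq_listSlice,
      PySem.List.slice_to p (b := 8) (by omega),
      PySem.List.slice_from p (a := 8) (by omega),
      show ((8:Int)).toNat = 8 from rfl]
    simp
  | case2 out p h =>
    rw [pvChunks, if_neg h, pvRem, if_neg h]
    simp

theorem pvChunks_mem (l : List Char) (c : List Char) (hc : c ∈ pvChunks l) :
    c.length = 8 ∧ ∀ ch ∈ c, ch ∈ l := by
  fun_induction pvChunks l with
  | case1 l h ih =>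
    rcases List.mem_cons.mp hc with h1 | h1
    · subst h1
      refine ⟨by simp; omega, fun ch hch => List.mem_of_mem_take hch⟩
    · obtain ⟨hl, hm⟩ := ih h1
      exact ⟨hl, fun ch hch => List.mem_of_mem_drop (hm ch hch)⟩
  | case2 l h => simp at hc

theorem pvFmtB_chars (n : Nat) (ch : Char) (h : ch ∈ pvFmtB n) : ch = '0' ∨ ch = '1' := by
  fun_induction pvFmtB n with
  | case1 => simp at h
  | case2 n hn ih =>
    rcases List.mem_append.mp h with h1 | h1
    · exact ih h1
    · simp at h1
      subst h1
      split <;> simp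

theorem pvTokenBitsB_chars (n : Int) (ch : Char) (h : ch ∈ pvTokenBitsB n) : ch = '0' ∨ ch = '1' := by
  simp only [pvTokenBitsB] at h
  rcases List.mem_append.mp h with h1 | h1
  · exact Or.inl (List.eq_of_mem_replicate h1)
  · by_cases hn : n > 0
    · rw [if_pos hn] at h1; exact pvFmtB_chars _ _ h1
    · rw [if_neg hn] at h1; simp at h1

theorem pvRem_length (l : List Char) : (pvRem l).length < 8 := by
  fun_induction pvRem l with
  | case1 l h ih => exact ih
  | case2 l h => omega

-- B's fold invariant
theorem pvFoldB (ts : List String) (out : List (List Char)) (p : List Char) (hp : p.length < 8) :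
    ts.foldl (fun st caracter =>
        pvEmitB st.1 (st.2 ++ pvTokenBitsB ((PySem.Int.ofStr? caracter).getD 0))) (out, p)
      = (out ++ pvChunks (p ++ ts.flatMap (fun c => pvTokenBitsB ((PySem.Int.ofStr? c).getD 0))),
         pvRem (p ++ ts.flatMap (fun c => pvTokenBitsB ((PySem.Int.ofStr? c).getD 0)))) := by
  induction ts generalizing out p with
  | nil =>
    simp only [List.foldl_nil, List.flatMap_nil, List.append_nil]
    rw [pvChunks, if_neg (by omega), pvRem, if_neg (by omega)]
    simp
  | cons t ts ih =>
    simp only [List.foldl_cons, List.flatMap_cons]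
    rw [pvEmitB_eq, ih _ _ (pvRem_length _)]
    conv_rhs => rw [← List.append_assoc p,
      pvChunks_append (p ++ pvTokenBitsB ((PySem.Int.ofStr? t).getD 0)),
      pvRem_append (p ++ pvTokenBitsB ((PySem.Int.ofStr? t).getD 0))]
    simp [List.append_assoc]

theorem pvSliceChunk (k : Nat) (l : List Char) :
    PySem.Chars.slice l (some (0 + 8 * (k : Int))) (some (0 + 8 * (k : Int) + 8))
      = (l.drop (8 * k)).take 8 := by
  rw [PySem.Chars.slice_eq_listSlice]
  have e1 : (0 + 8 * (k : Int)) = ((8 * k : Nat) : Int) := by push_cast; ring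
  have e2 : (0 + 8 * (k : Int) + 8) = ((8 * k + 8 : Nat) : Int) := by push_cast; ring
  rw [e2, e1, PySem.List.slice_natCast]
  congr 1
  omega

theorem pvByteAux (m : Nat) (bits : List Char) (acc : List Char) (hm : m = bits.length / 8) :
    (List.range m).foldl
      (fun res (k : Nat) => res ++ PySem.Chars.slice bits (some (0 + 8 * (k : Int))) (some (0 + 8 * (k : Int) + 8)) ++ [' '])
      acc
    = acc ++ (pvChunks bits).flatMap (fun c => c ++ [' ']) := by
  induction m generalizing bits acc with
  | zero =>
    rw [pvChunks, if_neg (by omega)]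
    simp
  | succ m ih =>
    have h8 : 8 ≤ bits.length := by
      rcases Nat.lt_or_ge bits.length 8 with hlt | hge
      · rw [Nat.div_eq_of_lt hlt] at hm; omega
      · exact hge
    rw [List.range_succ_eq_map, List.foldl_cons, List.foldl_map]
    have hstep : ∀ (res : List Char) (k : Nat),
        res ++ PySem.Chars.slice bits (some (0 + 8 * ((Nat.succ k : Nat) : Int))) (some (0 + 8 * ((Nat.succ k : Nat) : Int) + 8)) ++ [' ']
          = res ++ PySem.Chars.slice (bits.drop 8) (some (0 + 8 * (k : Int))) (some (0 + 8 * (k : Int) + 8)) ++ [' '] := by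
      intro res k
      rw [pvSliceChunk, pvSliceChunk, List.drop_drop,
        show 8 * Nat.succ k = 8 + 8 * k by omega]
    simp only [hstep]
    rw [ih _ _ (by rw [List.length_drop]; omega)]
    conv_rhs => rw [pvChunks, if_pos h8]
    rw [pvSliceChunk 0 bits]
    simp

-- A's byte loop produces the chunks, each followed by a space
theorem pvByteLoopA (bits : List Char) :
    (PySem.List.pyRange 0 (PySem.Int.floordiv (bits.length : Int) 8 * 8) 8).foldl
      (fun res i => res ++ PySem.Chars.slice bits (some i) (some (i + 8)) ++ [' '])
      ([] : List Char)
    = (pvChunks bits).flatMap (fun c => c ++ [' ']) := by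
  have hfd : PySem.Int.floordiv (bits.length : Int) 8 = ((bits.length / 8 : Nat) : Int) := by
    exact_mod_cast PySem.Int.floordiv_natCast bits.length 8
  rw [hfd, PySem.List.pyRange_of_pos 0 _ (by omega : (0:Int) < 8)]
  by_cases hm : bits.length / 8 = 0
  · rw [hm]
    rw [if_neg (by norm_num)]
    rw [pvChunks, if_neg (by omega)]
    simp
  · have hpos : (0:Int) < ((bits.length / 8 : Nat) : Int) * 8 := by
      have : 1 ≤ bits.length / 8 := by omega
      push_cast
      nlinarith [this]
    rw [if_pos hpos]
    have hcount : ((((bits.length / 8 : Nat) : Int) * 8 - 0 + 8 - 1) / 8).toNat = bits.length / 8 := by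
      omega
    rw [hcount, List.foldl_map]
    exact pvByteAux (bits.length / 8) bits [] rfl

theorem pvJoinFlat (c : List Char) (rest : List (List Char)) :
    (c :: rest).flatMap (fun x => x ++ [' ']) = PySem.Chars.join [' '] (c :: rest) ++ [' '] := by
  induction rest generalizing c with
  | nil => simp [PySem.Chars.join_singleton]
  | cons d rest ih =>
    rw [show (c :: d :: rest).flatMap (fun x => x ++ [' '])
        = (c ++ [' ']) ++ (d :: rest).flatMap (fun x => x ++ [' ']) from by simp]
    rw [ih d, PySem.Chars.join_cons_cons]
    simp

theorem pvJoinHead (c : List Char) (rest : List (List Char)) (hc : c ≠ []) :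
    (PySem.Chars.join [' '] (c :: rest)).head? = c.head? := by
  cases rest with
  | nil => rw [PySem.Chars.join_singleton]
  | cons d rest =>
    rw [PySem.Chars.join_cons_cons]
    cases c with
    | nil => exact absurd rfl hc
    | cons ch ct => simp

theorem pvJoinLast (cs : List (List Char)) (hne : cs ≠ []) (h : ∀ c ∈ cs, c ≠ []) :
    ∃ c ∈ cs, (PySem.Chars.join [' '] cs).getLast? = c.getLast? := by
  induction cs with
  | nil => cases hne rfl
  | cons c rest ih =>
    cases rest with
    | nil => exact ⟨c, by simp, by rw [PySem.Chars.join_singleton]⟩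
    | cons d rest2 =>
      obtain ⟨e, he, heq⟩ := ih (by simp) (fun x hx => h x (List.mem_cons_of_mem c hx))
      have hene : e ≠ [] := h e (List.mem_cons_of_mem c he)
      refine ⟨e, List.mem_cons_of_mem c he, ?_⟩
      rw [PySem.Chars.join_cons_cons, List.getLast?_append, heq,
        List.getLast?_eq_some_getLast hene, Option.some_or]

theorem pvStripJoin (cs : List (List Char))
    (h : ∀ c ∈ cs, c ≠ [] ∧ ∀ ch ∈ c, ¬ PySem.Chars.isspace ch) :
    PySem.Chars.strip (cs.flatMap (fun c => c ++ [' '])) = PySem.Chars.join [' '] cs := by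
  cases cs with
  | nil => rfl
  | cons c rest =>
    have hc : c ≠ [] := (h c (by simp)).1
    rw [pvJoinFlat]
    have hh : ∃ ch, (PySem.Chars.join [' '] (c :: rest)).head? = some ch ∧
        ¬ PySem.Chars.isspace ch := by
      rw [pvJoinHead c rest hc]
      cases c with
      | nil => exact absurd rfl hc
      | cons ch ct => exact ⟨ch, rfl, (h (ch :: ct) (by simp)).2 ch (List.mem_cons_self)⟩
    have hl : ∃ ch, (PySem.Chars.join [' '] (c :: rest)).getLast? = some ch ∧
        ¬ PySem.Chars.isspace ch := by
      obtain ⟨e, he, heq⟩ := pvJoinLast (c :: rest) (by simp) (fun x hx => (h x hx).1)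
      have hene : e ≠ [] := (h e he).1
      refine ⟨e.getLast hene, by rw [heq, List.getLast?_eq_some_getLast hene], ?_⟩
      exact (h e he).2 _ (List.getLast_mem hene)
    obtain ⟨hch, hx1, hx2⟩ := hh
    obtain ⟨lch, hl1, hl2⟩ := hl
    generalize hx : PySem.Chars.join [' '] (c :: rest) = x at *
    cases x with
    | nil => simp at hx1
    | cons a xt =>
      have ha : a = hch := by simpa using hx1
      simp only [PySem.Chars.strip, PySem.Chars.lstrip, PySem.Chars.rstrip]
      rw [List.cons_append, List.dropWhile_cons, if_neg (by rw [ha]; simp [hx2])]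
      rw [show a :: (xt ++ [' ']) = (a :: xt) ++ [' '] from rfl, List.reverse_append]
      rw [show ([' '] : List Char).reverse = [' '] from rfl]
      rw [show ([' '] : List Char) ++ (a :: xt).reverse = ' ' :: (a :: xt).reverse from rfl]
      rw [List.dropWhile_cons, if_pos (by decide)]
      cases hrev : (a :: xt).reverse with
      | nil => simp at hrev
      | cons r rt =>
        have hr : r = lch := by
          have := List.head?_reverse (l := a :: xt)
          rw [hrev, hl1] at this
          simpa using this
        rw [List.dropWhile_cons, if_neg (by rw [hr]; simp [hl2])]
        rw [← hrev, List.reverse_reverse]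

-- ===== VERDICT (by name: the statement is the Claim_ definition above) =====
theorem indices_a_binario_spec : Claim_equal_indices_a_binario := by
  unfold Claim_equal_indices_a_binario
  intro t hdom hpre
  unfold Spec_indices_a_binario
  simp only [indices_a_binario, indices_a_binario_alt]
  rw [PySem.List.foldl_append_eq_flatMap]
  simp only [List.nil_append, tokenBits_eq]
  rw [pvFoldB (PySem.Str.split₀ t) [] [] (by simp)]
  simp only [List.nil_append]
  rw [pvByteLoopA, pvStripJoin]
  intro ch hc
  obtain ⟨hlen, hmem⟩ := pvChunks_mem _ ch hc
  refine ⟨by intro hnil; rw [hnil] at hlen; simp at hlen, ?_⟩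
  intro x hx
  obtain ⟨tok, _, hxt⟩ := List.mem_flatMap.mp (hmem x hx)
  rcases pvTokenBitsB_chars _ x hxt with h0 | h0 <;> subst h0 <;> decide
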